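-- pv_equiv track=rewrite | github.com/CLEVER1337/acmp_agent | solutions/250.py | find_closest_dvoyakoe
-- ===== SOURCE A (Python) =====
-- def is_dvoyakoe(n):
--     s = str(n)
--     return len(set(s)) <= 2
--
-- def find_closest_dvoyakoe(N):
--     if is_dvoyakoe(N):
--         return N
--
--     lower = N - 1
--     while lower >= 1:
--         if is_dvoyakoe(lower):
--             break
--         lower -= 1
--
--     higher = N + 1
--     while higher <= 30000:
--         if is_dvoyakoe(higher):
--             break
--         higher += 1
--
--     if lower < 1:
--         return higher
--     if higher > 30000:
--         return lower
--
--     dist_lower = N - lower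
--     dist_higher = higher - N
--
--     if dist_lower < dist_higher:
--         return lower
--     elif dist_higher < dist_lower:
--         return higher
--     else:
--         return lower
-- ===== SOURCE B (Python) =====
-- def is_dvoyakoe(n):
--     s = str(n)
--     return len(set(s)) <= 2
--
-- def find_closest_dvoyakoe(N):
--     if is_dvoyakoe(N):
--         return N
--     d = 1
--     while True:
--         lo = N - d
--         hi = N + d
--         if lo >= 1 and is_dvoyakoe(lo):
--             return lo
--         if hi <= 30000 and is_dvoyakoe(hi):
--             return hi
--         d += 1
-- ===== Notes on version B (the rewrite author's own statement) =====
-- stated objective: alternative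
-- what changed: Replaces A's two separate full scans (downward to the nearest valid lower number, upward to the nearest valid higher number) followed by a distance comparison with a single expanding-radius loop that at each growing radius checks the lower candidate (with A's lower-bound guard) before the upper candidate (with A's upper-bound guard), so the first hit is the answer and the distance comparison and tie-break disappear.
import Mathlib
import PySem

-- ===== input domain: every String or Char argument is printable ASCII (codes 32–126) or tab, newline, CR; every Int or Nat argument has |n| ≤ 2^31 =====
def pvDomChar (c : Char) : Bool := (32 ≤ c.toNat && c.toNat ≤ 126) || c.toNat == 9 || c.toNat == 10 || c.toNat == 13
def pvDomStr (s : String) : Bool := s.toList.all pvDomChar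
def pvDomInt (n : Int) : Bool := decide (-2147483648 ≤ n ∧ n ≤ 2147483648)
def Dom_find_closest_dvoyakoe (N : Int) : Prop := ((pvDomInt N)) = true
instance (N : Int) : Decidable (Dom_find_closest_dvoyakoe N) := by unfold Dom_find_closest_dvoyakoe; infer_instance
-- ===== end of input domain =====

-- B replaces A's two full one-sided scans + distance comparison by one expanding-radius
-- loop (check N-d, then N+d); alternative decomposition, same asymptotic cost.


-- ===== PORT A =====
-- is_dvoyakoe(n): len(set(str(n))) <= 2   (shared helper of both Python files)
def is_dvoyakoe (n : Int) : Bool :=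
  decide ((PySem.Set.ofList (PySem.Int.toChars n)).length ≤ 2)

-- A's first while loop: while lower >= 1: if is_dvoyakoe(lower): break; lower -= 1
def lowerLoopA (lower : Int) : Int :=
  if h : 1 ≤ lower then
    if is_dvoyakoe lower then lower else lowerLoopA (lower - 1)
  else lower
termination_by lower.toNat
decreasing_by omega

-- A's second while loop: while higher <= 30000: if is_dvoyakoe(higher): break; higher += 1
def higherLoopA (higher : Int) : Int :=
  if h : higher ≤ 30000 then
    if is_dvoyakoe higher then higher else higherLoopA (higher + 1)
  else higher
termination_by (30001 - higher).toNat
decreasing_by omega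

def find_closest_dvoyakoe (N : Int) : Int :=
  if is_dvoyakoe N then N
  else
    let lower := lowerLoopA (N - 1)
    let higher := higherLoopA (N + 1)
    if lower < 1 then higher
    else if 30000 < higher then lower
    else
      let dist_lower := N - lower
      let dist_higher := higher - N
      if dist_lower < dist_higher then lower
      else if dist_higher < dist_lower then higher
      else lower

-- ===== PORT B =====
-- B's 'while True' loop over the radius d; the fuel only makes the recursion total
-- (it is proved sufficient: the loop always fires at radius |N - 1| at the latest).
def altLoop (N d : Int) (fuel : Nat) : Int :=
  match fuel with
  | 0 => 0
  | fuel + 1 =>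
    let lo := N - d
    let hi := N + d
    if 1 ≤ lo ∧ is_dvoyakoe lo then lo
    else if hi ≤ 30000 ∧ is_dvoyakoe hi then hi
    else altLoop N (d + 1) fuel

def find_closest_dvoyakoe_alt (N : Int) : Int :=
  if is_dvoyakoe N then N
  else altLoop N 1 (N.natAbs + 2)

-- ===== PRECONDITION & SPEC =====
def Spec_find_closest_dvoyakoe (N : Int) (out : Int) : Prop := out = find_closest_dvoyakoe_alt N
instance (N : Int) (out : Int) : Decidable (Spec_find_closest_dvoyakoe N out) := by unfold Spec_find_closest_dvoyakoe; infer_instance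

-- ===== CLAIM (what is proved, stated in full; the proofs are below) =====
def Claim_equal_find_closest_dvoyakoe : Prop := ∀ (N : Int), Dom_find_closest_dvoyakoe N → Spec_find_closest_dvoyakoe N (find_closest_dvoyakoe N)

-- ===== LEMMAS AND PROOFS =====

def hitLo (N e : Int) : Prop := 1 ≤ N - e ∧ is_dvoyakoe (N - e) = true
def hitHi (N e : Int) : Prop := N + e ≤ 30000 ∧ is_dvoyakoe (N + e) = true

theorem dv_one : is_dvoyakoe 1 = true := by decide

-- A's lower loop finds k when k is the first valid value going down from x.
theorem lowerLoopA_found (fuel : Nat) : ∀ (x k : Int), (x - k).toNat ≤ fuel → 1 ≤ k → k ≤ x →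
    is_dvoyakoe k = true → (∀ j, k < j → j ≤ x → is_dvoyakoe j = false) → lowerLoopA x = k := by
  induction fuel with
  | zero =>
    intro x k hf h1 hkx hdv _
    have hx : x = k := by omega
    subst hx
    rw [lowerLoopA]
    simp [h1, hdv]
  | succ n ih =>
    intro x k hf h1 hkx hdv hno
    rcases eq_or_lt_of_le hkx with h | hlt
    · subst h
      rw [lowerLoopA]; simp [h1, hdv]
    · have hx1 : (1:Int) ≤ x := by omega
      have hdx : is_dvoyakoe x = false := hno x hlt le_rfl
      rw [lowerLoopA]
      simp only [hx1, hdx, Bool.false_eq_true, if_false, dif_pos]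
      exact ih (x - 1) k (by omega) h1 (by omega) hdv (fun j hj1 hj2 => hno j hj1 (by omega))

theorem lowerLoopA_le_self (x : Int) : lowerLoopA x ≤ x := by
  induction hn : x.toNat using Nat.strong_induction_on generalizing x with
  | _ n ih =>
    rw [lowerLoopA]
    by_cases h1 : (1:Int) ≤ x
    · by_cases hd : is_dvoyakoe x
      · simp [h1, hd]
      · simp only [h1, hd, Bool.false_eq_true, if_false, dif_pos]
        have := ih (x - 1).toNat (by omega) (x - 1) rfl
        omega
    · simp [h1]

-- If nothing in (t, x] with value ≥ 1 is valid, the lower loop ends < 1 or ≤ t.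
theorem lowerLoopA_le (fuel : Nat) : ∀ (x t : Int), (x - t).toNat ≤ fuel →
    (∀ j, t < j → j ≤ x → 1 ≤ j → is_dvoyakoe j = false) →
    lowerLoopA x < 1 ∨ lowerLoopA x ≤ t := by
  induction fuel with
  | zero =>
    intro x t hf _
    have := lowerLoopA_le_self x
    omega
  | succ n ih =>
    intro x t hf hno
    by_cases hxt : x ≤ t
    · have := lowerLoopA_le_self x
      omega
    · by_cases h1 : (1:Int) ≤ x
      · have hdx : is_dvoyakoe x = false := hno x (by omega) le_rfl h1
        rw [lowerLoopA]
        simp only [h1, hdx, Bool.false_eq_true, if_false, dif_pos]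
        exact ih (x - 1) t (by omega) (fun j hj1 hj2 hj3 => hno j hj1 (by omega) hj3)
      · rw [lowerLoopA]
        simp only [h1, dif_neg, not_false_iff]
        omega

-- A's higher loop finds k when k is the first valid value going up from x.
theorem higherLoopA_found (fuel : Nat) : ∀ (x k : Int), (k - x).toNat ≤ fuel → x ≤ k → k ≤ 30000 →
    is_dvoyakoe k = true → (∀ j, x ≤ j → j < k → is_dvoyakoe j = false) → higherLoopA x = k := by
  induction fuel with
  | zero =>
    intro x k hf hxk h3 hdv _
    have hx : x = k := by omega
    subst hx
    rw [higherLoopA]; simp [h3, hdv]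
  | succ n ih =>
    intro x k hf hxk h3 hdv hno
    rcases eq_or_lt_of_le hxk with h | hlt
    · subst h
      rw [higherLoopA]; simp [h3, hdv]
    · have hx3 : x ≤ (30000:Int) := by omega
      have hdx : is_dvoyakoe x = false := hno x le_rfl hlt
      rw [higherLoopA]
      simp only [hx3, hdx, Bool.false_eq_true, if_false, dif_pos]
      exact ih (x + 1) k (by omega) (by omega) h3 hdv (fun j hj1 hj2 => hno j (by omega) hj2)

theorem higherLoopA_ge_self (x : Int) : x ≤ higherLoopA x := by
  induction hn : (30001 - x).toNat using Nat.strong_induction_on generalizing x with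
  | _ n ih =>
    rw [higherLoopA]
    by_cases h1 : x ≤ (30000:Int)
    · by_cases hd : is_dvoyakoe x
      · simp [h1, hd]
      · simp only [h1, hd, Bool.false_eq_true, if_false, dif_pos]
        have := ih (30001 - (x + 1)).toNat (by omega) (x + 1) rfl
        omega
    · simp [h1]

-- If nothing in [x, t) with value ≤ 30000 is valid, the higher loop ends > 30000 or ≥ t.
theorem higherLoopA_ge (fuel : Nat) : ∀ (x t : Int), (t - x).toNat ≤ fuel →
    (∀ j, x ≤ j → j < t → j ≤ 30000 → is_dvoyakoe j = false) →
    30000 < higherLoopA x ∨ t ≤ higherLoopA x := by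
  induction fuel with
  | zero =>
    intro x t hf _
    have := higherLoopA_ge_self x
    omega
  | succ n ih =>
    intro x t hf hno
    by_cases hxt : t ≤ x
    · have := higherLoopA_ge_self x
      omega
    · by_cases h1 : x ≤ (30000:Int)
      · have hdx : is_dvoyakoe x = false := hno x le_rfl (by omega) h1
        rw [higherLoopA]
        simp only [h1, hdx, Bool.false_eq_true, if_false, dif_pos]
        exact ih (x + 1) t (by omega) (fun j hj1 hj2 hj3 => hno j (by omega) hj2 hj3)
      · rw [higherLoopA]
        simp only [h1, dif_neg, not_false_iff]
        omega

-- B's loop, run past no-hit radii, computes exactly A's else-branch value.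
theorem altLoop_main (fuel : Nat) : ∀ (N d : Int), 1 ≤ d → is_dvoyakoe N = false →
    (∃ e, d ≤ e ∧ (e - d).toNat < fuel ∧ (hitLo N e ∨ hitHi N e)) →
    (∀ e, 1 ≤ e → e < d → ¬ hitLo N e ∧ ¬ hitHi N e) →
    altLoop N d fuel = find_closest_dvoyakoe N := by
  induction fuel with
  | zero =>
    intro N d _ _ hex _
    obtain ⟨e, _, hfe, _⟩ := hex
    omega
  | succ n ih =>
    intro N d hd1 hnd hex hno
    rw [altLoop]
    by_cases hlo : hitLo N d
    · -- loop fires on the low side at radius d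
      obtain ⟨hlo1, hlo2⟩ := hlo
      rw [if_pos ⟨hlo1, hlo2⟩]
      -- A's lower scan ends exactly at N - d
      have hL : lowerLoopA (N - 1) = N - d := by
        apply lowerLoopA_found ((N - 1) - (N - d)).toNat (N - 1) (N - d) le_rfl hlo1 (by omega) hlo2
        intro j hj1 hj2
        have he := hno (N - j) (by omega) (by omega)
        have : ¬ ((1:Int) ≤ j ∧ is_dvoyakoe j = true) := by
          have := he.1
          simpa [hitLo, show N - (N - j) = j by ring] using this
        by_cases hdj : is_dvoyakoe j = true
        · exact absurd ⟨by omega, hdj⟩ this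
        · simpa using hdj
      -- A's higher scan ends > 30000 or at distance ≥ d
      have hH : 30000 < higherLoopA (N + 1) ∨ N + d ≤ higherLoopA (N + 1) := by
        apply higherLoopA_ge ((N + d) - (N + 1)).toNat (N + 1) (N + d) le_rfl
        intro j hj1 hj2 hj3
        have he := hno (j - N) (by omega) (by omega)
        have : ¬ ((j:Int) ≤ 30000 ∧ is_dvoyakoe j = true) := by
          have := he.2
          simpa [hitHi, show N + (j - N) = j by ring] using this
        by_cases hdj : is_dvoyakoe j = true
        · exact absurd ⟨hj3, hdj⟩ this
        · simpa using hdj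
      rw [find_closest_dvoyakoe, if_neg (by simp [hnd])]
      simp only [hL]
      rcases hH with hH | hH
      · split_ifs <;> omega
      · split_ifs <;> omega
    · by_cases hhi : hitHi N d
      · -- low side misses, loop fires on the high side at radius d
        obtain ⟨hhi1, hhi2⟩ := hhi
        rw [if_neg (show ¬(1 ≤ N - d ∧ is_dvoyakoe (N - d) = true) from hlo), if_pos ⟨hhi1, hhi2⟩]
        -- A's higher scan ends exactly at N + d
        have hH : higherLoopA (N + 1) = N + d := by
          apply higherLoopA_found ((N + d) - (N + 1)).toNat (N + 1) (N + d) le_rfl (by omega) hhi1 hhi2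
          intro j hj1 hj2
          have he := hno (j - N) (by omega) (by omega)
          have : ¬ ((j:Int) ≤ 30000 ∧ is_dvoyakoe j = true) := by
            have := he.2
            simpa [hitHi, show N + (j - N) = j by ring] using this
          by_cases hdj : is_dvoyakoe j = true
          · exact absurd ⟨by omega, hdj⟩ this
          · simpa using hdj
        -- A's lower scan ends < 1 or at distance > d
        have hL : lowerLoopA (N - 1) < 1 ∨ lowerLoopA (N - 1) ≤ N - d - 1 := by
          apply lowerLoopA_le ((N - 1) - (N - d - 1)).toNat (N - 1) (N - d - 1) le_rfl
          intro j hj1 hj2 hj3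
          have hcond : ¬ ((1:Int) ≤ N - (N - j) ∧ is_dvoyakoe (N - (N - j)) = true) := by
            rcases eq_or_lt_of_le (show N - d ≤ j by omega) with h | h
            · have := hlo
              simpa [hitLo, ← h] using this
            · exact (hno (N - j) (by omega) (by omega)).1
          have : ¬ ((1:Int) ≤ j ∧ is_dvoyakoe j = true) := by
            simpa [show N - (N - j) = j by ring] using hcond
          by_cases hdj : is_dvoyakoe j = true
          · exact absurd ⟨hj3, hdj⟩ this
          · simpa using hdj
        rw [find_closest_dvoyakoe, if_neg (by simp [hnd])]
        simp only [hH]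
        rcases hL with hL | hL
        · split_ifs; omega
        · split_ifs <;> omega
      · -- no hit at radius d: move on
        rw [if_neg (show ¬(1 ≤ N - d ∧ is_dvoyakoe (N - d) = true) from hlo),
            if_neg (show ¬(N + d ≤ 30000 ∧ is_dvoyakoe (N + d) = true) from hhi)]
        apply ih N (d + 1) (by omega) hnd
        · obtain ⟨e, he1, he2, he3⟩ := hex
          have hne : e ≠ d := by rintro rfl; exact absurd he3 (by simp [hlo, hhi])
          exact ⟨e, by omega, by omega, he3⟩
        · intro e he1 he2
          by_cases h' : e < d
          · exact hno e he1 h'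
          · have : e = d := by omega
            subst this; exact ⟨hlo, hhi⟩

-- ===== VERDICT (by name: the statement is the Claim_ definition above) =====
theorem find_closest_dvoyakoe_spec : Claim_equal_find_closest_dvoyakoe := by
  intro N _
  unfold Spec_find_closest_dvoyakoe
  by_cases h : is_dvoyakoe N = true
  · rw [find_closest_dvoyakoe_alt, if_pos h, find_closest_dvoyakoe, if_pos h]
  · have hnd : is_dvoyakoe N = false := by simpa using h
    rw [find_closest_dvoyakoe_alt, if_neg (by simp [hnd])]
    symm
    apply altLoop_main (N.natAbs + 2) N 1 le_rfl hnd
    · -- the loop always fires by radius |N - 1|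
      by_cases h2 : (2:Int) ≤ N
      · exact ⟨N - 1, by omega, by omega, Or.inl ⟨by omega, by simpa using dv_one⟩⟩
      · have hN1 : N ≠ 1 := by intro h'; rw [h'] at hnd; simp [dv_one] at hnd
        have hN0 : N ≤ 0 := by omega
        exact ⟨1 - N, by omega, by omega, Or.inr ⟨by omega, by simpa using dv_one⟩⟩
    · intro e he1 he2; omega
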